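-- pv_equiv track=rewrite | github.com/Championsh/Extra-Programming | Python/School Contests/Homework/8.py | check
-- ===== SOURCE A (Python) =====
-- from collections import Counter
--
-- def check(s):
--     k = 0
--     f = dict(Counter(s))
--     j = ''
--     for i in range(len(s)-1):
--         if s[i] == s[i+1] and s.count(s[i]) == 2:
--             k += 1
--             j = s[i]
--
--     for x in f:
--         if x != j and f[x] > 1:
--             return 0
--     if k == 1:
--         return 1
--     else:
--         return 0
-- ===== SOURCE B (Python) =====
-- from collections import Counter
--
-- def check(s):
--     f = Counter(s)
--     dups = [c for c in f if f[c] > 1]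
--     if len(dups) != 1 or f[dups[0]] != 2:
--         return 0
--     return 1 if dups[0] * 2 in s else 0
-- ===== Notes on version B (the rewrite author's own statement) =====
-- stated objective: faster
-- what changed: Replaced A's adjacent-pair index scan (which calls s.count inside the loop) and its separate leftover-duplicate loop by a single count-based classification: collect the characters whose Counter value exceeds 1, require exactly one such character with count exactly 2, and test adjacency as one doubled-substring membership test.
import Mathlib
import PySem

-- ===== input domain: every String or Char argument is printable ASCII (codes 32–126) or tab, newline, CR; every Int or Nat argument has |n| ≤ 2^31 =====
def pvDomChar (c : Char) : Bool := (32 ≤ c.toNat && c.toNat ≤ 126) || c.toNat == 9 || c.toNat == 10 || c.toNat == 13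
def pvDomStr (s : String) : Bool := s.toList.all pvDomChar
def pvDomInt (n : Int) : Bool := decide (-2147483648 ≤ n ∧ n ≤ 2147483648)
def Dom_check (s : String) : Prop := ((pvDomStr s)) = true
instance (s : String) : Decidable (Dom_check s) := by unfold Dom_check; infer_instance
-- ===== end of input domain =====

-- B replaces A's adjacent-pair index scan and its separate leftover-duplicate loop by a
-- count-based classification of the duplicated characters plus one doubled-substring test
-- (objective: simpler).

-- ===== PORT A =====
-- Python's j = '' / j = s[i] (a 1-char string) is ported as Option Char: none / some c.
def check (s : String) : Int :=
  let f := PySem.Dict.counter s.toList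
  let kj := (PySem.List.pyRange 0 ((PySem.Str.len s : Int) - 1)).foldl
    (fun (kj : Int × Option Char) i =>
      match PySem.Str.pyGet? s i, PySem.Str.pyGet? s (i + 1) with
      | some a, some b =>
          if a = b ∧ (PySem.Str.count s (String.ofList [a]) : Int) = 2 then (kj.1 + 1, some a)
          else kj
      | _, _ => kj)
    ((0 : Int), (none : Option Char))
  if (PySem.Dict.keys f).any (fun x => decide (some x ≠ kj.2) && decide (1 < f.getD x 0)) then 0
  else if kj.1 = 1 then 1 else 0

-- ===== PORT B =====
def check_alt (s : String) : Int :=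
  let f := PySem.Dict.counter s.toList
  let dups := ((PySem.Dict.items f).filter (fun p => decide (1 < p.2))).map Prod.fst
  if dups.length ≠ 1 then 0
  else
    match dups with
    | [] => 0
    | c :: _ =>
        if f.getD c 0 ≠ 2 then 0
        else if PySem.Str.isIn (String.ofList [c, c]) s then 1 else 0

-- ===== PRECONDITION & SPEC =====
def Spec_check (s : String) (out : Int) : Prop := out = check_alt s
instance (s : String) (out : Int) : Decidable (Spec_check s out) := by unfold Spec_check; infer_instance

-- ===== CLAIM (what is proved, stated in full; the proofs are below) =====
def Claim_equal_check : Prop := ∀ (s : String), Dom_check s → Spec_check s (check s)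

-- ===== LEMMAS AND PROOFS =====

-- the per-index decision of A's first loop, on the list side
def pvPairF (l : List Char) (i : Nat) : Option Char :=
  match l[i]?, l[i + 1]? with
  | some a, some b => if a = b ∧ l.count a = 2 then some a else none
  | _, _ => none

-- the characters A's first loop records, in loop order
def pvGood (l : List Char) : List Char := (List.range (l.length - 1)).filterMap (pvPairF l)

-- the final value of A's variable j, given the recorded characters
def pvLastOpt (g : List Char) (j : Option Char) : Option Char := g.foldl (fun _ a => some a) j

theorem pv_count_go (a : Char) (fuel : Nat) : ∀ (l : List Char) (acc : Nat), l.length ≤ fuel →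
    PySem.Chars.count.go [a] fuel l acc = acc + l.count a := by
  induction fuel with
  | zero =>
    intro l acc h
    rw [PySem.Chars.count.go.eq_def]
    cases l with
    | nil => simp
    | cons x t => simp at h
  | succ n ih =>
    intro l acc h
    rw [PySem.Chars.count.go.eq_def]
    cases l with
    | nil => simp
    | cons x t =>
      simp only [List.length_cons] at h
      by_cases hx : a = x
      · subst hx
        simp only [List.isPrefixOf, beq_self_eq_true, List.isPrefixOf_nil_left, Bool.and_self,
          if_true, List.length_cons, List.length_nil]
        rw [show ((0 : Nat) + 1) = 1 from rfl, List.drop_one, List.tail_cons,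
          ih t (acc + 1) (by omega), List.count_cons_self]
        omega
      · have hb : (a == x) = false := by simp [hx]
        simp only [List.isPrefixOf, hb, Bool.false_and, Bool.false_eq_true, if_false]
        rw [ih t acc (by omega), List.count_cons_of_ne (by exact fun hh => hx hh.symm)]

-- s.count(c) for a single character c is the list count
theorem pv_count_single (l : List Char) (a : Char) : PySem.Chars.count l [a] = l.count a := by
  unfold PySem.Chars.count
  simp [pv_count_go a l.length l 0 (le_refl _)]

-- A's first loop, characterized: k counts the recorded characters, j is the last one
theorem pv_fold (s : String) (is : List Nat) : ∀ (k0 : Int) (j0 : Option Char),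
    (is.map Int.ofNat).foldl
      (fun (kj : Int × Option Char) i =>
        match PySem.Str.pyGet? s i, PySem.Str.pyGet? s (i + 1) with
        | some a, some b =>
            if a = b ∧ (PySem.Str.count s (String.ofList [a]) : Int) = 2 then (kj.1 + 1, some a)
            else kj
        | _, _ => kj) (k0, j0)
    = (k0 + ((is.filterMap (pvPairF s.toList)).length : Int),
       pvLastOpt (is.filterMap (pvPairF s.toList)) j0) := by
  induction is with
  | nil => intro k0 j0; simp [pvLastOpt]
  | cons i t ih =>
    intro k0 j0
    simp only [List.map_cons, List.foldl_cons, List.filterMap_cons]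
    have hget1 : PySem.Str.pyGet? s (Int.ofNat i) = s.toList[i]? := by
      rw [show Int.ofNat i = (i : Int) from rfl]
      simp [PySem.Str.pyGet?_eq]
    have hget2 : PySem.Str.pyGet? s (Int.ofNat i + 1) = s.toList[i + 1]? := by
      rw [show (Int.ofNat i + 1) = ((i + 1 : Nat) : Int) from rfl,
        PySem.Str.pyGet?_eq, PySem.Chars.pyGet?_eq_listPyGet?, PySem.List.pyGet?_natCast]
    rw [hget1, hget2]
    cases h1 : s.toList[i]? with
    | none =>
      have hp : pvPairF s.toList i = none := by simp [pvPairF, h1]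
      simp only [hp]
      exact ih k0 j0
    | some a =>
      cases h2 : s.toList[i + 1]? with
      | none =>
        have hp : pvPairF s.toList i = none := by simp [pvPairF, h1, h2]
        simp only [hp]
        exact ih k0 j0
      | some b =>
        by_cases hc : a = b ∧ s.toList.count a = 2
        · have hp : pvPairF s.toList i = some a := by
            simp only [pvPairF, h1, h2]
            rw [if_pos hc]
          have hc' : a = b ∧ (PySem.Str.count s (String.ofList [a]) : Int) = 2 := by
            refine ⟨hc.1, ?_⟩
            rw [PySem.Str.count_eq, show (String.ofList [a]).toList = [a] by simp,
              pv_count_single, hc.2]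
            rfl
          simp only [hp, if_pos hc']
          rw [ih (k0 + 1) (some a)]
          refine Prod.ext ?_ ?_
          · simp only [List.length_cons]; push_cast; ring
          · rfl
        · have hp : pvPairF s.toList i = none := by
            simp only [pvPairF, h1, h2]
            rw [if_neg hc]
          have hc' : ¬(a = b ∧ (PySem.Str.count s (String.ofList [a]) : Int) = 2) := by
            intro hh
            refine hc ⟨hh.1, ?_⟩
            have := hh.2
            rw [PySem.Str.count_eq, show (String.ofList [a]).toList = [a] by simp,
              pv_count_single] at this
            exact_mod_cast this
          simp only [hp, if_neg hc']
          exact ih k0 j0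

-- unpack one hit of A's loop condition
theorem pvPairF_some {l : List Char} {i : Nat} {a : Char} (h : pvPairF l i = some a) :
    l[i]? = some a ∧ l[i + 1]? = some a ∧ l.count a = 2 := by
  unfold pvPairF at h
  cases h1 : l[i]? with
  | none => rw [h1] at h; simp at h
  | some x =>
    cases h2 : l[i + 1]? with
    | none => rw [h1, h2] at h; simp at h
    | some y =>
      rw [h1, h2] at h
      simp only at h
      by_cases hc : x = y ∧ l.count x = 2
      · rw [if_pos hc] at h
        injection h with hxa
        subst hxa
        exact ⟨rfl, by rw [hc.1], hc.2⟩
      · rw [if_neg hc] at h; cases h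

-- a recorded character occurs, has count 2, and occurs doubled
theorem pv_mem_good {l : List Char} {a : Char} (h : a ∈ pvGood l) :
    a ∈ l ∧ l.count a = 2 ∧ [a, a] <:+: l := by
  unfold pvGood at h
  rcases List.mem_filterMap.mp h with ⟨i, hi, hf⟩
  rcases pvPairF_some hf with ⟨h1, h2, hcnt⟩
  have hmem : a ∈ l := List.mem_of_getElem? h1
  refine ⟨hmem, hcnt, ?_⟩
  have hilt : i < l.length := (List.getElem?_eq_some_iff.mp h1).1
  have hilt2 : i + 1 < l.length := (List.getElem?_eq_some_iff.mp h2).1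
  refine ⟨l.take i, l.drop (i + 2), ?_⟩
  have hd1 : l.drop i = a :: l.drop (i + 1) := by
    rw [List.drop_eq_getElem_cons hilt]
    congr 1
    exact (List.getElem?_eq_some_iff.mp h1).2.symm ▸ rfl
  have hd2 : l.drop (i + 1) = a :: l.drop (i + 2) := by
    rw [List.drop_eq_getElem_cons hilt2]
    congr 1
    exact (List.getElem?_eq_some_iff.mp h2).2.symm ▸ rfl
  calc l.take i ++ [a, a] ++ l.drop (i + 2)
      = l.take i ++ l.drop i := by rw [hd1, hd2]; simp
    _ = l := List.take_append_drop i l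

-- conversely, a character of count 2 that occurs doubled is recorded
theorem pv_good_mem {l : List Char} {a : Char} (hcnt : l.count a = 2) (hinf : [a, a] <:+: l) :
    a ∈ pvGood l := by
  rcases hinf with ⟨u, v, huv⟩
  unfold pvGood
  refine List.mem_filterMap.mpr ⟨u.length, ?_, ?_⟩
  · refine List.mem_range.mpr ?_
    have : l.length = u.length + 2 + v.length := by rw [← huv]; simp; omega
    omega
  · have huv' : u ++ ([a, a] ++ v) = l := by rw [← huv]; simp
    have h1 : l[u.length]? = some a := by
      rw [← huv', List.getElem?_append_right (le_refl u.length)]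
      simp
    have h2 : l[u.length + 1]? = some a := by
      rw [← huv', List.getElem?_append_right (by omega)]
      simp
    unfold pvPairF
    rw [h1, h2]
    simp [hcnt]

-- a character of count 2 is recorded at a unique loop index
theorem pv_lt_absurd {l : List Char} {i i' : Nat} {a : Char}
    (h : pvPairF l i = some a) (h' : pvPairF l i' = some a) (hlt : i < i') : False := by
  rcases pvPairF_some h with ⟨h1, h2, hcnt⟩
  rcases pvPairF_some h' with ⟨h1', h2', -⟩
  have hilt2 : i + 1 < l.length := (List.getElem?_eq_some_iff.mp h2).1
  have hd1 : l.drop i = a :: l.drop (i + 1) := by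
    rw [List.drop_eq_getElem_cons (by omega)]
    congr 1
    exact (List.getElem?_eq_some_iff.mp h1).2.symm ▸ rfl
  have hd2 : l.drop (i + 1) = a :: l.drop (i + 2) := by
    rw [List.drop_eq_getElem_cons hilt2]
    congr 1
    exact (List.getElem?_eq_some_iff.mp h2).2.symm ▸ rfl
  have hsplit : l.count a = (l.take i).count a + (l.drop i).count a := by
    rw [← List.count_append, List.take_append_drop]
  have hdropcnt : (l.drop i).count a = 2 + (l.drop (i + 2)).count a := by
    rw [hd1, hd2]
    simp
    omega
  have hzero : (l.drop (i + 2)).count a = 0 := by omega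
  have hnot : a ∉ l.drop (i + 2) := by
    rw [← List.count_eq_zero] at *
    exact hzero
  have hmem : a ∈ l.drop (i + 2) := by
    have hidx : l[i' + 1]? = some a := h2'
    have : (l.drop (i + 2))[i' + 1 - (i + 2)]? = some a := by
      rw [List.getElem?_drop]
      rw [show i + 2 + (i' + 1 - (i + 2)) = i' + 1 by omega]
      exact hidx
    exact List.mem_of_getElem? this
  exact hnot hmem

theorem pv_good_nodup (l : List Char) : (pvGood l).Nodup := by
  unfold pvGood
  refine List.Nodup.filterMap ?_ (List.nodup_range)
  intro i i' a ha ha'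
  rcases lt_trichotomy i i' with h | h | h
  · exact absurd (pv_lt_absurd ha ha' h) (fun x => x)
  · exact h
  · exact absurd (pv_lt_absurd ha' ha h) (fun x => x)

-- a nodup list whose elements all equal c, containing c, is [c]
theorem pv_nodup_singleton {g : List Char} {c : Char} (hnd : g.Nodup) (hc : c ∈ g)
    (hall : ∀ x ∈ g, x = c) : g = [c] := by
  cases g with
  | nil => exact absurd hc (List.not_mem_nil)
  | cons x t =>
    have hx : x = c := hall x List.mem_cons_self
    cases t with
    | nil => rw [hx]
    | cons y t' =>
      exfalso
      have hy : y = c := hall y (List.mem_cons_of_mem x List.mem_cons_self)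
      have : x ∉ y :: t' := (List.nodup_cons.mp hnd).1
      exact this (by rw [hx, ← hy] at *; exact List.mem_cons_self)

-- ===== VERDICT (by name: the statement is the Claim_ definition above) =====
-- normal form for A
theorem pv_checkA (s : String) : check s =
    if (PySem.Set.ofList s.toList).any (fun x =>
        decide (some x ≠ pvLastOpt (pvGood s.toList) none) &&
        decide ((1 : Int) < (s.toList.count x : Int))) then 0
    else if ((pvGood s.toList).length : Int) = 1 then 1 else 0 := by
  have hrange : PySem.List.pyRange 0 ((PySem.Str.len s : Int) - 1)
      = (List.range (s.toList.length - 1)).map Int.ofNat := by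
    rw [PySem.Str.len_eq]
    cases hn : s.toList.length with
    | zero => decide
    | succ m =>
      rw [show ((Nat.succ m : Nat) : Int) - 1 = ((m : Nat) : Int) by push_cast; ring]
      rw [PySem.List.pyRange_zero_natCast]
      rfl
  simp only [check]
  rw [hrange, pv_fold s (List.range (s.toList.length - 1)) 0 none]
  simp only [PySem.Dict.keys_counter, PySem.Dict.getD_counter, zero_add]
  rfl

-- normal form for B
theorem pv_checkB (s : String) : check_alt s =
    (let dups := (PySem.Set.ofList s.toList).filter (fun c =>
        decide ((1 : Int) < (s.toList.count c : Int)))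
     if dups.length ≠ 1 then 0
     else
       match dups with
       | [] => 0
       | c :: _ =>
           if (s.toList.count c : Int) ≠ 2 then 0
           else if PySem.Str.isIn (String.ofList [c, c]) s then 1 else 0) := by
  simp only [check_alt, PySem.Dict.items_counter, PySem.Dict.getD_counter,
    List.filter_map, List.map_map, Function.comp_def, List.map_id']

-- ===== VERDICT (by name: the statement is the Claim_ definition above) =====
theorem check_spec : Claim_equal_check := by
  intro s _
  unfold Spec_check
  rw [pv_checkA, pv_checkB]
  set l := s.toList with hl
  set D := (PySem.Set.ofList l).filter (fun c => decide ((1 : Int) < (l.count c : Int))) with hDdef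
  have hD_mem : ∀ x, x ∈ D ↔ (x ∈ l ∧ 1 < l.count x) := by
    intro x
    rw [hDdef, List.mem_filter, PySem.Set.mem_ofList]
    constructor
    · rintro ⟨h1, h2⟩; exact ⟨h1, by exact_mod_cast of_decide_eq_true h2⟩
    · rintro ⟨h1, h2⟩; exact ⟨h1, decide_eq_true (by exact_mod_cast h2)⟩
  have hG_mem : ∀ a, a ∈ pvGood l → a ∈ D ∧ l.count a = 2 ∧ [a, a] <:+: l := by
    intro a ha
    rcases pv_mem_good ha with ⟨h1, h2, h3⟩
    exact ⟨(hD_mem a).mpr ⟨h1, by omega⟩, h2, h3⟩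
  cases hD : D with
  | nil =>
    -- no duplicated character at all: both sides return 0
    have hnodup : ∀ x ∈ l, ¬ 1 < l.count x := by
      intro x hx hgt
      have : x ∈ D := (hD_mem x).mpr ⟨hx, hgt⟩
      rw [hD] at this
      exact absurd this (List.not_mem_nil)
    have hG : pvGood l = [] := by
      cases hg : pvGood l with
      | nil => rfl
      | cons a t =>
        exfalso
        have := hG_mem a (hg ▸ List.mem_cons_self)
        rw [hD] at this
        exact absurd this.1 (List.not_mem_nil)
    have hany : ((PySem.Set.ofList l).any (fun x =>
        decide (some x ≠ pvLastOpt (pvGood l) none) &&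
        decide ((1 : Int) < (l.count x : Int)))) = false := by
      rw [List.any_eq_false]
      intro x hx
      simp only [Bool.and_eq_true, decide_eq_true_eq]
      rintro ⟨-, hgt⟩
      exact hnodup x ((PySem.Set.mem_ofList l x).mp hx) (by exact_mod_cast hgt)
    rw [hany]
    simp [hG]
  | cons c t =>
    have hcD : c ∈ D := hD ▸ List.mem_cons_self
    have hcl : c ∈ l := ((hD_mem c).mp hcD).1
    have hccnt : 1 < l.count c := ((hD_mem c).mp hcD).2
    cases t with
    | nil =>
      -- exactly one duplicated character c
      have hall : ∀ x ∈ l, 1 < l.count x → x = c := by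
        intro x hx hgt
        have : x ∈ D := (hD_mem x).mpr ⟨hx, hgt⟩
        rw [hD] at this
        simpa using this
      by_cases h2 : l.count c = 2
      · by_cases hinf : [c, c] <:+: l
        · -- the good case: both sides return 1
          have hGsing : pvGood l = [c] := by
            refine pv_nodup_singleton (pv_good_nodup l) (pv_good_mem h2 hinf) ?_
            intro x hx
            rcases pv_mem_good hx with ⟨hx1, hx2, _⟩
            exact hall x hx1 (by omega)
          have hlast : pvLastOpt (pvGood l) none = some c := by rw [hGsing]; rfl
          have hany : ((PySem.Set.ofList l).any (fun x =>
              decide (some x ≠ pvLastOpt (pvGood l) none) &&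
              decide ((1 : Int) < (l.count x : Int)))) = false := by
            rw [List.any_eq_false]
            intro x hx
            simp only [hlast, Bool.and_eq_true, decide_eq_true_eq]
            rintro ⟨hne, hgt⟩
            exact hne (by rw [hall x ((PySem.Set.mem_ofList l x).mp hx) (by exact_mod_cast hgt)])
          rw [hany]
          have hIn : PySem.Chars.isIn [c, c] s.toList = true := by
            rw [PySem.Chars.isIn_iff_infix]
            exact hinf
          simp [hGsing, hIn, h2]
        · -- count 2 but not adjacent: both sides return 0
          have hG : pvGood l = [] := by
            cases hg : pvGood l with
            | nil => rfl
            | cons a tg =>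
              exfalso
              rcases pv_mem_good (hg ▸ List.mem_cons_self (l := tg) (a := a)) with ⟨ha1, ha2, ha3⟩
              exact hinf (hall a ha1 (by omega) ▸ ha3)
          have hany : ((PySem.Set.ofList l).any (fun x =>
              decide (some x ≠ pvLastOpt (pvGood l) none) &&
              decide ((1 : Int) < (l.count x : Int)))) = true := by
            rw [List.any_eq_true]
            refine ⟨c, (PySem.Set.mem_ofList l c).mpr hcl, ?_⟩
            rw [hG]
            simp only [Bool.and_eq_true, decide_eq_true_eq]
            exact ⟨(by intro hh; cases hh), (by exact_mod_cast hccnt)⟩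
          rw [hany]
          have hIn : PySem.Chars.isIn [c, c] s.toList = false := by
            rw [PySem.Chars.isIn_eq_false_iff]
            exact hinf
          simp [hIn, h2]
      · -- the one duplicate has count ≠ 2: both sides return 0
        have hany : ((PySem.Set.ofList l).any (fun x =>
            decide (some x ≠ pvLastOpt (pvGood l) none) &&
            decide ((1 : Int) < (l.count x : Int)))) = true := by
          rw [List.any_eq_true]
          refine ⟨c, (PySem.Set.mem_ofList l c).mpr hcl, ?_⟩
          have hG : pvGood l = [] := by
            cases hg : pvGood l with
            | nil => rfl
            | cons a tg =>
              exfalso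
              rcases pv_mem_good (hg ▸ List.mem_cons_self (l := tg) (a := a)) with ⟨ha1, ha2, _⟩
              exact h2 (hall a ha1 (by omega) ▸ ha2)
          rw [hG]
          simp only [Bool.and_eq_true, decide_eq_true_eq]
          exact ⟨(by intro hh; cases hh), (by exact_mod_cast hccnt)⟩
        rw [hany]
        have hc2 : ((l.count c : Int) ≠ 2) := by
          intro hh; exact h2 (by exact_mod_cast hh)
        simp [hc2]
    | cons d t' =>
      -- at least two duplicated characters: both sides return 0
      have hdD : d ∈ D := hD ▸ List.mem_cons_of_mem c List.mem_cons_self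
      have hdl : d ∈ l := ((hD_mem d).mp hdD).1
      have hdcnt : 1 < l.count d := ((hD_mem d).mp hdD).2
      have hnd : D.Nodup := List.Nodup.filter _ (PySem.Set.nodup_ofList l)
      have hcd : c ≠ d := by
        rw [hD] at hnd
        intro hh
        exact (List.nodup_cons.mp hnd).1 (hh ▸ List.mem_cons_self)
      have hany : ((PySem.Set.ofList l).any (fun x =>
          decide (some x ≠ pvLastOpt (pvGood l) none) &&
          decide ((1 : Int) < (l.count x : Int)))) = true := by
        rw [List.any_eq_true]
        cases hj : pvLastOpt (pvGood l) none with
        | none =>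
          refine ⟨c, (PySem.Set.mem_ofList l c).mpr hcl, ?_⟩
          simp only [hj, Bool.and_eq_true, decide_eq_true_eq]
          exact ⟨(by intro hh; cases hh), (by exact_mod_cast hccnt)⟩
        | some e =>
          by_cases hce : c = e
          · refine ⟨d, (PySem.Set.mem_ofList l d).mpr hdl, ?_⟩
            simp only [hj, Bool.and_eq_true, decide_eq_true_eq]
            refine ⟨?_, by exact_mod_cast hdcnt⟩
            intro hh
            injection hh with hh'
            exact hcd (hce.trans hh'.symm)
          · refine ⟨c, (PySem.Set.mem_ofList l c).mpr hcl, ?_⟩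
            simp only [hj, Bool.and_eq_true, decide_eq_true_eq]
            refine ⟨?_, by exact_mod_cast hccnt⟩
            intro hh
            injection hh with hh'
            exact hce hh'
      rw [hany]
      have hlen : ((c :: d :: t').length ≠ 1) := by simp
      simp [hD, hlen]
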